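-- pv_equiv track=rewrite | github.com/crixodia/aoc | 2021/03_binary_diagnostic/main.py | solve
-- ===== SOURCE A (Python) =====
-- def solve(binary_records: list) -> tuple:
--     n = len(binary_records[0])
--
--     zeros = [0] * n
--     ones = [0] * n
--
--     for record in binary_records:
--         for i in range(n):
--             if record[i] == "0":
--                 zeros[i] += 1
--             else:
--                 ones[i] += 1
--
--     most_common = ["1" if zeros[i] <= ones[i] else "0" for i in range(n)]
--     least_common = ["0" if zeros[i] <= ones[i] else "1" for i in range(n)]
--
--     return "".join(most_common), "".join(least_common)
-- ===== SOURCE B (Python) =====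
-- def solve(binary_records: list) -> tuple:
--     m = len(binary_records)
--     most = []
--     least = []
--     for col in zip(*binary_records):
--         # median of the sorted, normalised column: '1' wins ties since with
--         # zeros == ones the element at index m//2 is the first '1'
--         bit = sorted('0' if c == '0' else '1' for c in col)[m // 2]
--         most.append(bit)
--         least.append('1' if bit == '0' else '0')
--     return "".join(most), "".join(least)
-- ===== Notes on version B (the rewrite author's own statement) =====
-- stated objective: alternative
-- what changed: B transposes the records and picks each output bit as the median element of the sorted normalised column (sort-then-index), instead of A's row-wise accumulation of two per-position zero/one count arrays compared at the end.
import Mathlib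
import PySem

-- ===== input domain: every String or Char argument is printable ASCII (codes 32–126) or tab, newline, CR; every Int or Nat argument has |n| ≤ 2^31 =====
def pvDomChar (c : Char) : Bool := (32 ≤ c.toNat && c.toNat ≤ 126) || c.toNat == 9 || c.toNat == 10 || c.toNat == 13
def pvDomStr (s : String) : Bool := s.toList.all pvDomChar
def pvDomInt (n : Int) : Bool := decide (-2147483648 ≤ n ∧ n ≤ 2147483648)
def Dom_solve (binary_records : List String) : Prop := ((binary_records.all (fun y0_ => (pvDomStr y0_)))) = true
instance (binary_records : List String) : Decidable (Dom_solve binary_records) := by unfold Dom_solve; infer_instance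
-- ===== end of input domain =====

-- B decides each output bit as the median of the sorted (normalised) column instead of
-- A's row-wise accumulation of two per-position count arrays (alternative algorithm,
-- no speed claim); return values agree on all inputs where A returns.

-- ===== PORT A =====
-- one step of A's inner `for i in range(n)` loop: bump zeros[i] or ones[i]
def solveStep (r : List Char) (zo : List Nat × List Nat) (i : Nat) : List Nat × List Nat :=
  if r.getD i ' ' == '0' then (zo.1.set i (zo.1.getD i 0 + 1), zo.2)
  else (zo.1, zo.2.set i (zo.2.getD i 0 + 1))

def solve (binary_records : List String) : String × String :=
  let n := (binary_records.headD "").length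
  let zo := binary_records.foldl (fun zo r => (List.range n).foldl (solveStep r.toList) zo)
              (List.replicate n 0, List.replicate n 0)
  ((List.range n).map (fun i => if zo.1.getD i 0 ≤ zo.2.getD i 0 then '1' else '0') |> String.ofList,
   (List.range n).map (fun i => if zo.1.getD i 0 ≤ zo.2.getD i 0 then '0' else '1') |> String.ofList)

-- ===== PORT B =====
-- termination measure lemma for zipCols (cited by name in its decreasing_by)
theorem zip_tail_sum_lt (rows : List (List Char)) (hne : rows ≠ [])
    (hall : ∀ r ∈ rows, r ≠ []) :
    (((rows.map List.tail).map List.length).sum < ((rows.map List.length).sum)) := by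
  induction rows with
  | nil => exact absurd rfl hne
  | cons r rest ih =>
    have hr : r ≠ [] := hall r (by simp)
    have hr1 : 1 ≤ r.length := by cases r with | nil => exact absurd rfl hr | cons a t => simp
    by_cases hrest : rest = []
    · subst hrest; simp [List.length_tail]; omega
    · have := ih hrest (fun s hs => hall s (by simp [hs]))
      simp [List.length_tail] at *; omega

-- Python's zip(*rows): list of columns, truncated to the shortest row
def zipCols (rows : List (List Char)) : List (List Char) :=
  if h : rows.isEmpty || rows.any List.isEmpty then []
  else (rows.map (fun r => r.headD ' ')) :: zipCols (rows.map List.tail)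
termination_by (rows.map List.length).sum
decreasing_by
  simp only [Bool.or_eq_true, List.isEmpty_iff, List.any_eq_true, not_or, not_exists] at h
  have hlt := zip_tail_sum_lt rows h.1 (fun r hr => by
    have := h.2; simp at this; exact List.isEmpty_eq_false_iff.mp (by simpa using this r hr))
  simpa using hlt

-- one column's output bit: median of the sorted, normalised column.
-- the `[m // 2]` indexing is ported with getD; inside the loop col.length = m ≥ 1,
-- so the index is in range and getD is exact there.
def colBit (m : Nat) (col : List Char) : Char :=
  (PySem.List.sorted (col.map (fun c => if c == '0' then '0' else '1')) (fun x => x) false).getD (m / 2) ' '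

def solve_alt (binary_records : List String) : String × String :=
  let m := binary_records.length
  let mlc := (zipCols (binary_records.map String.toList)).foldl
    (fun acc col =>
      let bit := colBit m col
      (acc.1 ++ [bit], acc.2 ++ [if bit == '0' then '1' else '0']))
    (([] : List Char), ([] : List Char))
  (String.ofList mlc.1, String.ofList mlc.2)

-- ===== PRECONDITION & SPEC =====
-- Pre_ excludes exactly the inputs where A raises IndexError: the empty list
-- (binary_records[0]) and lists where some record is shorter than the first record (record[i]).
def Pre_solve (binary_records : List String) : Prop :=
  binary_records ≠ [] ∧ ∀ r ∈ binary_records, (binary_records.headD "").length ≤ r.length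
instance (binary_records : List String) : Decidable (Pre_solve binary_records) := by
  unfold Pre_solve; infer_instance

def pvWitness_solve : List String := (["010", "111", "000"])

def Spec_solve (binary_records : List String) (out : String × String) : Prop := out = solve_alt binary_records
instance (binary_records : List String) (out : String × String) : Decidable (Spec_solve binary_records out) := by unfold Spec_solve; infer_instance

-- ===== CLAIM (what is proved, stated in full; the proofs are below) =====
def Claim_equal_solve : Prop := ∀ (binary_records : List String), Dom_solve binary_records → Pre_solve binary_records → Spec_solve binary_records (solve binary_records)

-- ===== LEMMAS AND PROOFS =====

theorem getD_set_self {l : List Nat} {i a : Nat} (h : i < l.length) :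
    (l.set i a).getD i 0 = a := by
  simp [List.getD_eq_getElem?_getD, List.getElem?_set_self', List.getElem?_eq_getElem h]

theorem getD_set_ne {l : List Nat} {i j a : Nat} (h : i ≠ j) :
    (l.set i a).getD j 0 = l.getD j 0 := by
  simp [List.getD_eq_getElem?_getD, List.getElem?_set_ne h]

theorem inner_get (r : List Char) (k : Nat) (z o : List Nat) (j : Nat) :
    ((List.range k).foldl (solveStep r) (z, o)).1.length = z.length ∧
    ((List.range k).foldl (solveStep r) (z, o)).2.length = o.length ∧
    (j < z.length →
      ((List.range k).foldl (solveStep r) (z, o)).1.getD j 0 =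
        z.getD j 0 + (if j < k ∧ r.getD j ' ' == '0' then 1 else 0)) ∧
    (j < o.length →
      ((List.range k).foldl (solveStep r) (z, o)).2.getD j 0 =
        o.getD j 0 + (if j < k ∧ ¬ r.getD j ' ' == '0' then 1 else 0)) := by
  induction k with
  | zero => simp
  | succ k ih =>
    rw [List.range_succ, List.foldl_append, List.foldl_cons, List.foldl_nil]
    obtain ⟨h1, h2, h3, h4⟩ := ih
    generalize hres : (List.range k).foldl (solveStep r) (z, o) = R at h1 h2 h3 h4 ⊢
    obtain ⟨zs, os⟩ := R
    simp only at h1 h2 h3 h4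
    simp only [solveStep]
    by_cases hc : (r.getD k ' ' == '0') = true
    · rw [if_pos hc]
      refine ⟨by simpa using h1, by simpa using h2, ?_, ?_⟩
      · intro hj
        by_cases hjk : j = k
        · rw [hjk] at hj h3 ⊢
          rw [getD_set_self (h1 ▸ hj : k < zs.length), h3 hj,
              if_neg (fun h => absurd h.1 (by omega)), if_pos ⟨by omega, hc⟩]
        · rw [getD_set_ne (Ne.symm hjk), h3 hj,
              if_congr (Iff.intro (fun h => ⟨by omega, h.2⟩)
                (fun h => ⟨by omega, h.2⟩) :
                (j < k ∧ (r.getD j ' ' == '0') = true) ↔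
                (j < k + 1 ∧ (r.getD j ' ' == '0') = true)) rfl rfl]
      · intro hj
        rw [h4 hj]
        by_cases hjk : j = k
        · rw [hjk,
              if_neg (fun h => absurd h.1 (by omega)),
              if_neg (fun h => h.2 hc)]
        · rw [if_congr (Iff.intro (fun h => ⟨by omega, h.2⟩)
                (fun h => ⟨by omega, h.2⟩) :
                (j < k ∧ ¬ (r.getD j ' ' == '0') = true) ↔
                (j < k + 1 ∧ ¬ (r.getD j ' ' == '0') = true)) rfl rfl]
    · rw [if_neg hc]
      refine ⟨by simpa using h1, by simpa using h2, ?_, ?_⟩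
      · intro hj
        rw [h3 hj]
        by_cases hjk : j = k
        · rw [hjk,
              if_neg (fun h => absurd h.1 (by omega)),
              if_neg (fun h => hc h.2)]
        · rw [if_congr (Iff.intro (fun h => ⟨by omega, h.2⟩)
                (fun h => ⟨by omega, h.2⟩) :
                (j < k ∧ (r.getD j ' ' == '0') = true) ↔
                (j < k + 1 ∧ (r.getD j ' ' == '0') = true)) rfl rfl]
      · intro hj
        by_cases hjk : j = k
        · rw [hjk] at hj h4 ⊢
          rw [getD_set_self (h2 ▸ hj : k < os.length), h4 hj,
              if_neg (fun h => absurd h.1 (by omega)), if_pos ⟨by omega, hc⟩]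
        · rw [getD_set_ne (Ne.symm hjk), h4 hj,
              if_congr (Iff.intro (fun h => ⟨by omega, h.2⟩)
                (fun h => ⟨by omega, h.2⟩) :
                (j < k ∧ ¬ (r.getD j ' ' == '0') = true) ↔
                (j < k + 1 ∧ ¬ (r.getD j ' ' == '0') = true)) rfl rfl]

theorem outer_get (n : Nat) (recs : List String) : ∀ (z o : List Nat) (j : Nat),
    z.length = n → o.length = n → j < n →
    (recs.foldl (fun zo r => (List.range n).foldl (solveStep r.toList) zo) (z, o)).1.getD j 0 =
      z.getD j 0 + recs.countP (fun r => r.toList.getD j ' ' == '0') ∧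
    (recs.foldl (fun zo r => (List.range n).foldl (solveStep r.toList) zo) (z, o)).2.getD j 0 =
      o.getD j 0 + recs.countP (fun r => !(r.toList.getD j ' ' == '0')) := by
  induction recs with
  | nil => intro z o j _ _ _; simp
  | cons r rest ih =>
    intro z o j hz ho hj
    simp only [List.foldl_cons, List.countP_cons]
    obtain ⟨l1, l2, g1, g2⟩ := inner_get r.toList n z o j
    have hres : (List.range n).foldl (solveStep r.toList) (z, o) =
        (((List.range n).foldl (solveStep r.toList) (z, o)).1,
         ((List.range n).foldl (solveStep r.toList) (z, o)).2) := rfl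
    rw [hres]
    obtain ⟨i1, i2⟩ := ih _ _ j (l1.trans hz) (l2.trans ho) hj
    rw [i1, i2, g1 (by omega), g2 (by omega)]
    constructor
    · by_cases hc : (r.toList.getD j ' ' == '0') = true <;> simp [hc, hj] <;> omega
    · by_cases hc : (r.toList.getD j ' ' == '0') = true <;> simp [hc, hj] <;> omega

theorem getD_succ_tail (r : List Char) (i : Nat) :
    r.getD (i + 1) ' ' = r.tail.getD i ' ' := by
  cases r <;> simp [List.getD]

theorem zipCols_eq (k : Nat) : ∀ (rows : List (List Char)), rows ≠ [] →
    (∀ r ∈ rows, k ≤ r.length) → (∃ r ∈ rows, r.length = k) →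
    zipCols rows = (List.range k).map (fun i => rows.map (fun r => r.getD i ' ')) := by
  induction k with
  | zero =>
    intro rows hne _ hex
    obtain ⟨r, hr, hlen⟩ := hex
    rw [zipCols]
    have : (rows.isEmpty || rows.any List.isEmpty) = true := by
      simp only [Bool.or_eq_true, List.any_eq_true]
      exact Or.inr ⟨r, hr, by simpa [List.isEmpty_iff, List.length_eq_zero_iff] using hlen⟩
    simp [this]
  | succ k ih =>
    intro rows hne hall hex
    rw [zipCols]
    have hcond : (rows.isEmpty || rows.any List.isEmpty) = false := by
      simp only [Bool.or_eq_false_iff, List.any_eq_false]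
      refine ⟨by simpa [List.isEmpty_iff] using hne, fun r hr => ?_⟩
      have hk := hall r hr
      simp only [List.isEmpty_iff]
      intro h0
      rw [h0] at hk
      simp at hk
    simp only [hcond, Bool.false_eq_true, if_false, dite_eq_ite]
    have htl : zipCols (rows.map List.tail) =
        (List.range k).map (fun i => (rows.map List.tail).map (fun r => r.getD i ' ')) := by
      apply ih
      · intro h
        exact hne (List.map_eq_nil_iff.mp h)
      · intro r hr
        obtain ⟨s, hs, rfl⟩ := List.mem_map.mp hr
        have := hall s hs
        simp [List.length_tail]
        omega
      · obtain ⟨r, hr, hlen⟩ := hex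
        exact ⟨r.tail, List.mem_map_of_mem hr, by simp [List.length_tail, hlen]⟩
    rw [htl, List.range_succ_eq_map, List.map_cons, List.map_map]
    congr 1
    · apply List.map_congr_left
      intro r _
      cases r <;> simp [List.getD]
    · apply List.map_congr_left
      intro i _
      simp only [Function.comp, List.map_map]
      apply List.map_congr_left
      intro r _
      exact (getD_succ_tail r i).symm

-- B's fold appends one character per column to each accumulator
theorem alt_fold (m : Nat) (cols : List (List Char)) : ∀ (a b : List Char),
    cols.foldl (fun acc col =>
      let bit := colBit m col
      (acc.1 ++ [bit], acc.2 ++ [if bit == '0' then '1' else '0'])) (a, b)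
    = (a ++ cols.map (colBit m),
       b ++ cols.map (fun col => if colBit m col == '0' then '1' else '0')) := by
  induction cols with
  | nil => intro a b; simp
  | cons c rest ih =>
    intro a b
    simp only [List.foldl_cons, List.map_cons, ih]
    simp

-- sorted of a list of '0'/'1' characters is the '0'-block followed by the '1'-block
theorem sorted_binary (l : List Char) (hl : ∀ c ∈ l, c = '0' ∨ c = '1') :
    PySem.List.sorted l (fun x => x) false =
      List.replicate (l.count '0') '0' ++ List.replicate (l.length - l.count '0') '1' := by
  apply PySem.List.sorted_id_eq_of_perm_of_pairwise
  · have hsum : l.count '0' + l.count '1' = l.length := by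
      induction l with
      | nil => rfl
      | cons c t iht =>
        have hc := hl c (by simp)
        have ht := iht (fun x hx => hl x (by simp [hx]))
        rcases hc with rfl | rfl <;> simp [List.count_cons] <;> omega
    have hz : l.count '0' ≤ l.length := List.count_le_length
    rw [List.perm_iff_count]
    intro a
    by_cases h0 : a = '0'
    · subst h0
      simp [List.count_append, List.count_replicate]
    · by_cases h1 : a = '1'
      · subst h1
        simp [List.count_append, List.count_replicate]
        omega
      · have hnm : a ∉ l := fun hm => by rcases hl a hm with rfl | rfl <;> simp at h0 h1
        rw [List.count_eq_zero.mpr hnm]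
        simp only [List.count_append, List.count_replicate]
        rw [if_neg (by simpa using fun h => h0 h.symm),
            if_neg (by simpa using fun h => h1 h.symm)]
  · rw [List.pairwise_append]
    refine ⟨List.pairwise_replicate.mpr (Or.inr le_rfl),
            List.pairwise_replicate.mpr (Or.inr le_rfl), ?_⟩
    intro x hx y hy
    rw [List.eq_of_mem_replicate hx, List.eq_of_mem_replicate hy]
    decide

-- the bit B computes for a column of length m ≥ 1
theorem colBit_eq (m : Nat) (col : List Char) (hlen : col.length = m) (hm : 1 ≤ m) :
    colBit m col = if 2 * col.countP (fun c => c == '0') ≤ m then '1' else '0' := by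
  unfold colBit
  set nl := col.map (fun c => if c == '0' then '0' else '1') with hnl
  have hmem : ∀ c ∈ nl, c = '0' ∨ c = '1' := by
    intro c hc
    obtain ⟨x, _, rfl⟩ := List.mem_map.mp hc
    by_cases hx : (x == '0') = true <;> simp [hx]
  have hz : nl.count '0' = col.countP (fun c => c == '0') := by
    rw [List.count, hnl, List.countP_map]
    apply List.countP_congr
    intro c _
    by_cases hx : (c == '0') = true <;> simp [Function.comp, hx]
  have hlnl : nl.length = m := by rw [hnl, List.length_map, hlen]
  rw [sorted_binary nl hmem, hz] at *
  set z := col.countP (fun c => c == '0') with hzdef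
  have hzm : z ≤ m := by
    rw [hzdef, ← hlen]; exact List.countP_le_length
  rw [List.getD_eq_getElem?_getD, List.getElem?_append]
  by_cases hlt : m / 2 < z
  · rw [if_pos (by simpa using hlt)]
    rw [List.getElem?_replicate, if_pos hlt]
    simp only [Option.getD_some]
    rw [if_neg (by omega)]
  · rw [if_neg (by simpa using hlt)]
    simp only [List.length_replicate]
    rw [List.getElem?_replicate, if_pos (by rw [hlnl, hz]; omega)]
    simp only [Option.getD_some]
    rw [if_pos (by omega)]

theorem getD_replicate_zero (n i : Nat) : (List.replicate n (0 : Nat)).getD i 0 = 0 := by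
  rw [List.getD_eq_getElem?_getD, List.getElem?_replicate]
  split <;> rfl

theorem count_split (p : String → Bool) (l : List String) :
    l.countP p + l.countP (fun r => !(p r)) = l.length := by
  induction l with
  | nil => rfl
  | cons h t ih => by_cases hp : p h = true <;> simp [List.countP_cons, hp] <;> omega

-- ===== VERDICT (by name: the statement is the Claim_ definition above) =====
theorem solve_spec : Claim_equal_solve := by
  intro recs _ hpre
  unfold Spec_solve
  obtain ⟨hne, hlen⟩ := hpre
  obtain ⟨s, t, rfl⟩ : ∃ s t, recs = s :: t := by
    cases recs with
    | nil => exact absurd rfl hne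
    | cons s t => exact ⟨s, t, rfl⟩
  have hrowsne : (s :: t).map String.toList ≠ [] := by simp
  have hall : ∀ r ∈ (s :: t).map String.toList, s.length ≤ r.length := by
    intro r hr
    obtain ⟨x, hx, rfl⟩ := List.mem_map.mp hr
    simpa using hlen x hx
  have hex : ∃ r ∈ (s :: t).map String.toList, r.length = s.length :=
    ⟨s.toList, by simp, by simp⟩
  have hz := zipCols_eq s.length ((s :: t).map String.toList) hrowsne hall hex
  rw [solve, solve_alt, hz, alt_fold, List.map_map, List.map_map]
  simp only [List.nil_append, List.headD_cons]
  have key : ∀ i ∈ List.range s.length,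
      colBit (s :: t).length ((s :: t).map String.toList |>.map (fun r => r.getD i ' ')) =
      (if ((s :: t).foldl
          (fun zo r => (List.range s.length).foldl (solveStep r.toList) zo)
          (List.replicate s.length 0, List.replicate s.length 0)).1.getD i 0 ≤
       ((s :: t).foldl
          (fun zo r => (List.range s.length).foldl (solveStep r.toList) zo)
          (List.replicate s.length 0, List.replicate s.length 0)).2.getD i 0
       then '1' else '0') := by
    intro i hi
    have hi' : i < s.length := List.mem_range.mp hi
    obtain ⟨e1, e2⟩ := outer_get s.length (s :: t)
      (List.replicate s.length 0) (List.replicate s.length 0) i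
      (List.length_replicate) (List.length_replicate) hi'
    rw [e1, e2, getD_replicate_zero]
    set col := ((s :: t).map String.toList).map (fun r => r.getD i ' ') with hcol
    have hclen : col.length = (s :: t).length := by simp [hcol]
    have hcnt : col.countP (fun c => c == '0')
        = (s :: t).countP (fun r => r.toList.getD i ' ' == '0') := by
      rw [hcol, List.countP_map, List.countP_map]
      rfl
    rw [colBit_eq _ _ hclen (by simp), hcnt]
    have := count_split (fun r => r.toList.getD i ' ' == '0') (s :: t)
    exact if_congr (by constructor <;> intro h <;> omega) rfl rfl
  refine Prod.ext ?_ ?_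
  · show String.ofList (((List.range s.length)).map _) = String.ofList _
    refine congrArg String.ofList (List.map_congr_left ?_)
    intro i hi
    simp only [Function.comp]
    exact (key i hi).symm
  · show String.ofList (((List.range s.length)).map _) = String.ofList _
    refine congrArg String.ofList (List.map_congr_left ?_)
    intro i hi
    simp only [Function.comp]
    rw [key i hi]
    split <;> simp
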